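-- pv_equiv track=rewrite | github.com/SanzCeb/faa | p3/ClasificadorPittsburgh.py | cruce
-- ===== SOURCE A (Python) =====
-- def cruce (progenitor_1, progenitor_2):
--     """Metodo que realiza un cruce uniforme y devuelve dos vastagos.
--     Los progenitores deben tener exactamente la misma estructura. En caso
--     contrario, se devolvera None"""
--     vastago_1 = []
--     vastago_2 = []
--     num_alelos = len(progenitor_1)
--
--     if num_alelos != len(progenitor_2):
--         return None
--     for i in range(num_alelos):
--         if i % 2:
--             vastago_1.append(progenitor_1[i])
--             vastago_2.append(progenitor_2[i])
--         else:
--             vastago_1.append(progenitor_2[i])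
--             vastago_2.append(progenitor_1[i])
--
--     return vastago_1,vastago_2
-- ===== SOURCE B (Python) =====
-- def cruce(progenitor_1, progenitor_2):
--     """Uniform crossover via strided slice assignment instead of an
--     element-wise loop with a parity branch."""
--     if len(progenitor_1) != len(progenitor_2):
--         return None
--     vastago_1 = list(progenitor_1)
--     vastago_1[::2] = progenitor_2[::2]
--     vastago_2 = list(progenitor_2)
--     vastago_2[::2] = progenitor_1[::2]
--     return vastago_1, vastago_2
-- ===== Notes on version B (the rewrite author's own statement) =====
-- stated objective: idiomatic
-- what changed: Replaces the index loop with its parity branch by copying each parent and overwriting its even positions with the other parent's even-index slice via strided slice assignment.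
import Mathlib
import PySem

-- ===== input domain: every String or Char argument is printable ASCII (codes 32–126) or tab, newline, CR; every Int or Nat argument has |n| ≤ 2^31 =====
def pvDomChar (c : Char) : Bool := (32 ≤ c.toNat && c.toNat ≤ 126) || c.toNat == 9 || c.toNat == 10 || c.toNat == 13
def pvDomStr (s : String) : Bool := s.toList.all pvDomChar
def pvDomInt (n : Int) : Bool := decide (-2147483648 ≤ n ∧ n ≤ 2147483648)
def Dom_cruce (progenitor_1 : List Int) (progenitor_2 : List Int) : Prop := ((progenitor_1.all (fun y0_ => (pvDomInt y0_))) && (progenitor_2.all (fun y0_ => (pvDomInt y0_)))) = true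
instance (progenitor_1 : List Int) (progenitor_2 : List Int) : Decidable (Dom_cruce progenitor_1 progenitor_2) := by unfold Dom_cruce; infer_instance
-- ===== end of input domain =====

-- B replaces A's index loop with its parity branch by copying each parent and
-- overwriting its even positions with the other parent's even-index slice (idiomatic decomposition).


-- ===== PORT A =====
-- literal port: loop over range(len(p1)), parity branch, two appended accumulators
def cruce (progenitor_1 : List Int) (progenitor_2 : List Int) : Option (List Int × List Int) :=
  if (progenitor_1.length : Int) ≠ (progenitor_2.length : Int) then none
  else
    let v := (PySem.List.pyRange 0 (progenitor_1.length : Int) 1).foldl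
      (fun (v : List Int × List Int) i =>
        if i % 2 ≠ 0 then
          (v.1 ++ [PySem.List.pyGetD progenitor_1 i 0], v.2 ++ [PySem.List.pyGetD progenitor_2 i 0])
        else
          (v.1 ++ [PySem.List.pyGetD progenitor_2 i 0], v.2 ++ [PySem.List.pyGetD progenitor_1 i 0]))
      ([], [])
    some (v.1, v.2)

-- ===== PORT B =====
-- xs[::2]  (PySem has no step-2 slice primitive; exact hand port of the stride-2 slice)
def everyOther : List Int → List Int
  | [] => []
  | [x] => [x]
  | x :: _ :: xs => x :: everyOther xs

-- v[::2] = r  (overwrite the even positions of v by the elements of r, in order);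
-- exact hand port of strided slice assignment for |r| = ceil(|v|/2)
def setEvens : List Int → List Int → List Int
  | _ :: v2 :: vs, r :: rs => r :: v2 :: setEvens vs rs
  | [_], r :: _ => [r]
  | vs, _ => vs

def cruce_alt (progenitor_1 : List Int) (progenitor_2 : List Int) : Option (List Int × List Int) :=
  if progenitor_1.length ≠ progenitor_2.length then none
  else
    some (setEvens progenitor_1 (everyOther progenitor_2),
          setEvens progenitor_2 (everyOther progenitor_1))

-- ===== PRECONDITION & SPEC =====
def Spec_cruce (progenitor_1 : List Int) (progenitor_2 : List Int) (out : Option (List Int × List Int)) : Prop := out = cruce_alt progenitor_1 progenitor_2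
instance (progenitor_1 : List Int) (progenitor_2 : List Int) (out : Option (List Int × List Int)) : Decidable (Spec_cruce progenitor_1 progenitor_2 out) := by unfold Spec_cruce; infer_instance

-- ===== CLAIM (what is proved, stated in full; the proofs are below) =====
def Claim_equal_cruce : Prop := ∀ (progenitor_1 : List Int) (progenitor_2 : List Int), Dom_cruce progenitor_1 progenitor_2 → Spec_cruce progenitor_1 progenitor_2 (cruce progenitor_1 progenitor_2)

-- ===== LEMMAS AND PROOFS =====

-- the parity-selected map over all indices is exactly B's slice-splicing
theorem map_parity_eq_setEvens : (a b : List Int) → a.length = b.length →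
    (List.range a.length).map
      (fun (k : Nat) => if ((k : Int)) % 2 ≠ 0 then a.getD k 0 else b.getD k 0)
    = setEvens a (everyOther b)
  | [], [], _ => rfl
  | [], _ :: _, h => by simp at h
  | _ :: _, [], h => by simp at h
  | [a1], [b1], _ => by simp [setEvens, everyOther]
  | [a1], _ :: _ :: _, h => by simp at h
  | _ :: _ :: _, [b1], h => by simp at h
  | a1 :: a2 :: as, b1 :: b2 :: bs, h => by
      have hlen : as.length = bs.length := by simpa using h
      have ih := map_parity_eq_setEvens as bs hlen
      simp only [List.length_cons, setEvens, everyOther]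
      rw [List.range_succ_eq_map, List.range_succ_eq_map]
      simp only [List.map_cons, List.map_map, Function.comp_def, Nat.succ_eq_add_one]
      have hmap : ∀ (g : Nat → Int), (∀ k, g k =
            if ((k : Int) + 1 + 1) % 2 ≠ 0 then (a1 :: a2 :: as).getD (k + 1 + 1) 0
            else (b1 :: b2 :: bs).getD (k + 1 + 1) 0) →
          (List.range as.length).map g
          = (List.range as.length).map
            (fun (k : Nat) => if ((k : Int)) % 2 ≠ 0 then as.getD k 0 else bs.getD k 0) := by
        intro g hg
        apply List.map_congr_left
        intro k _
        have h2 : ((k : Int) + 1 + 1) % 2 = (k : Int) % 2 := by omega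
        rw [hg, h2]
        simp [List.getD_cons_succ]
      rw [hmap _ (fun k => by push_cast; ring_nf), ih]
      norm_num

theorem cruce_eq (p1 p2 : List Int) : cruce p1 p2 = cruce_alt p1 p2 := by
  unfold cruce cruce_alt
  by_cases h : p1.length = p2.length
  · simp only [h, Int.natCast_inj, ne_eq, not_true_eq_false, if_false]
    rw [PySem.List.pyRange_zero_natCast]
    rw [List.foldl_map, show
      (fun (v : List Int × List Int) (k : Nat) =>
        if (k : Int) % 2 ≠ 0 then
          (v.1 ++ [PySem.List.pyGetD p1 (k : Int) 0], v.2 ++ [PySem.List.pyGetD p2 (k : Int) 0])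
        else
          (v.1 ++ [PySem.List.pyGetD p2 (k : Int) 0], v.2 ++ [PySem.List.pyGetD p1 (k : Int) 0]))
      = (fun (v : List Int × List Int) (k : Nat) =>
        if (k : Int) % 2 ≠ 0 then (v.1 ++ [p1.getD k 0], v.2 ++ [p2.getD k 0])
        else (v.1 ++ [p2.getD k 0], v.2 ++ [p1.getD k 0])) from by
        funext v k; simp [PySem.List.pyGetD_natCast]]
    -- split the pair fold into two maps (Nat-indexed variant of fold_pair)
    have hsplit : ∀ (l : List Nat) (acc : List Int × List Int),
        l.foldl (fun (v : List Int × List Int) (k : Nat) =>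
          if (k : Int) % 2 ≠ 0 then (v.1 ++ [p1.getD k 0], v.2 ++ [p2.getD k 0])
          else (v.1 ++ [p2.getD k 0], v.2 ++ [p1.getD k 0])) acc
        = (acc.1 ++ l.map (fun (k : Nat) => if ((k : Int)) % 2 ≠ 0 then p1.getD k 0 else p2.getD k 0),
           acc.2 ++ l.map (fun (k : Nat) => if ((k : Int)) % 2 ≠ 0 then p2.getD k 0 else p1.getD k 0)) := by
      intro l
      induction l with
      | nil => intro acc; simp
      | cons x xs ih =>
          intro acc
          rw [List.foldl_cons]
          by_cases hx : (x : Int) % 2 ≠ 0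
          · rw [if_pos hx, ih]; simp [hx]
          · rw [if_neg hx, ih]; push_neg at hx; simp [hx]
    rw [hsplit]
    rw [← h, map_parity_eq_setEvens p1 p2 h, h, map_parity_eq_setEvens p2 p1 h.symm]
    simp
  · simp [h]

-- ===== VERDICT (by name: the statement is the Claim_ definition above) =====
theorem cruce_spec : Claim_equal_cruce := by
  intro p1 p2 _
  unfold Spec_cruce
  exact cruce_eq p1 p2
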